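-- pv_equiv track=rewrite | github.com/rajmoham/Coding-Challenges | British Informatics Olympiad/2020/Q1.py | GetNewString
-- ===== SOURCE A (Python) =====
-- numerals = {10:"X", 9:"IX", 5:"V", 4:"IV", 1:"I"}
--
-- def GetNewString(character, char_count):
--     new_string = ""
--     for i in range(len(character)):
--         num = char_count[i]
--         while num != 0:
--             for j in numerals:
--                 if num >= j:
--                     num -= j
--                     new_string += numerals[j]
--                     break
--         new_string += character[i]
--
--     return new_string
-- ===== SOURCE B (Python) =====
-- ONES = ["", "I", "II", "III", "IV", "V", "VI", "VII", "VIII", "IX"]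
--
-- def GetNewString(character, char_count):
--     parts = []
--     for ch, num in zip(character, char_count):
--         parts.append("X" * (num // 10) + ONES[num % 10] + ch)
--     return "".join(parts)
-- ===== Notes on version B (the rewrite author's own statement) =====
-- stated objective: simpler
-- what changed: Replaces the greedy repeated-subtraction while-loop over the numeral dict by a closed-form per-count string 'X'*(num//10) + ONES[num%10] looked up in a 10-entry table, built per zipped (char,count) pair and joined once.
import Mathlib
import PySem

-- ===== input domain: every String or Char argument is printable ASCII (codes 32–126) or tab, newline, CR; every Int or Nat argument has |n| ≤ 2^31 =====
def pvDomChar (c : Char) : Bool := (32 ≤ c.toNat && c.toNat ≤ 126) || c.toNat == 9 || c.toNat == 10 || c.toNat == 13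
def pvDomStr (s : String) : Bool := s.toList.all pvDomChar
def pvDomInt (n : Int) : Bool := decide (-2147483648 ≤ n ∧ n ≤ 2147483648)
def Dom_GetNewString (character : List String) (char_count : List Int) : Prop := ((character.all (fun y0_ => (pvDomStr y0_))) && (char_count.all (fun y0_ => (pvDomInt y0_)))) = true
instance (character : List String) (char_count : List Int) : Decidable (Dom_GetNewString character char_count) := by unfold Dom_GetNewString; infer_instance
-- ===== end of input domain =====

-- B replaces A's greedy repeated-subtraction numeral loop by a closed-form table
-- lookup 'X'*(num//10) + ONES[num%10] per zipped (char, count) pair, joined once.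

-- ===== PORT A =====
-- the 'while num != 0' loop of A: the dict `numerals` is iterated in insertion
-- order 10, 9, 5, 4, 1; each pass appends the first numeral ≤ num and subtracts it.
-- For num < 0 Python loops forever (no branch fires); that case is outside Pre_
-- and the port returns the accumulator there only to be total.
def romA (num : Int) (acc : String) : String :=
  if num = 0 then acc
  else if 10 ≤ num then romA (num - 10) (acc ++ "X")
  else if 9 ≤ num then romA (num - 9) (acc ++ "IX")
  else if 5 ≤ num then romA (num - 5) (acc ++ "V")
  else if 4 ≤ num then romA (num - 4) (acc ++ "IV")
  else if 1 ≤ num then romA (num - 1) (acc ++ "I")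
  else acc
termination_by num.toNat
decreasing_by all_goals omega

def GetNewString (character : List String) (char_count : List Int) : String :=
  (PySem.List.pyRange 0 character.length 1).foldl
    (fun new_string i =>
      romA (PySem.List.pyGetD char_count i 0) new_string
        ++ PySem.List.pyGetD character i "")
    ""

-- ===== PORT B =====
def pvOnes : List String := ["", "I", "II", "III", "IV", "V", "VI", "VII", "VIII", "IX"]

-- one piece: 'X' * (num // 10) + ONES[num % 10] + ch
-- ('X' * n is ported by hand as a replicate-join; exact: Python yields "" for n ≤ 0,
--  matching Int.toNat's clamp)
def pieceB (p : String × Int) : String :=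
  String.join (List.replicate (PySem.Int.floordiv p.2 10).toNat "X")
    ++ PySem.List.pyGetD pvOnes (PySem.Int.mod p.2 10) ""
    ++ p.1

def GetNewString_alt (character : List String) (char_count : List Int) : String :=
  String.join ((character.zip char_count).map pieceB)

-- ===== PRECONDITION & SPEC =====
-- Pre_ excludes exactly the inputs on which A does not return: char_count shorter
-- than character (IndexError) and negative counts among the used ones (infinite loop).
def Pre_GetNewString (character : List String) (char_count : List Int) : Prop :=
  character.length ≤ char_count.length ∧
    ∀ n ∈ char_count.take character.length, 0 ≤ n
instance (character : List String) (char_count : List Int) : Decidable (Pre_GetNewString character char_count) := by unfold Pre_GetNewString; infer_instance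

def pvWitness_GetNewString : List String × List Int := (["a", "b"], [3, 14])

def Spec_GetNewString (character : List String) (char_count : List Int) (out : String) : Prop := out = GetNewString_alt character char_count
instance (character : List String) (char_count : List Int) (out : String) : Decidable (Spec_GetNewString character char_count out) := by unfold Spec_GetNewString; infer_instance

-- ===== CLAIM (what is proved, stated in full; the proofs are below) =====
def Claim_equal_GetNewString : Prop := ∀ (character : List String) (char_count : List Int), Dom_GetNewString character char_count → Pre_GetNewString character char_count → Spec_GetNewString character char_count (GetNewString character char_count)

-- ===== LEMMAS AND PROOFS =====

-- the accumulator of A's numeral loop only ever receives appends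
theorem romA_acc_out : ∀ (k : Nat) (n : Int), n.toNat ≤ k →
    ∀ acc, romA n acc = acc ++ romA n "" := by
  intro k
  induction k with
  | zero =>
    intro n hn acc
    unfold romA
    split_ifs with h0 h10 h9 h5 h4 h1
    · simp
    · exact absurd h10 (by omega)
    · exact absurd h9 (by omega)
    · exact absurd h5 (by omega)
    · exact absurd h4 (by omega)
    · exact absurd h1 (by omega)
    · simp
  | succ k ih =>
    intro n hn acc
    unfold romA
    split_ifs with h0 h10 h9 h5 h4 h1
    · simp
    · rw [ih (n - 10) (by omega) (acc ++ "X"), ih (n - 10) (by omega) ("" ++ "X")]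
      simp [String.append_assoc]
    · rw [ih (n - 9) (by omega) (acc ++ "IX"), ih (n - 9) (by omega) ("" ++ "IX")]
      simp [String.append_assoc]
    · rw [ih (n - 5) (by omega) (acc ++ "V"), ih (n - 5) (by omega) ("" ++ "V")]
      simp [String.append_assoc]
    · rw [ih (n - 4) (by omega) (acc ++ "IV"), ih (n - 4) (by omega) ("" ++ "IV")]
      simp [String.append_assoc]
    · rw [ih (n - 1) (by omega) (acc ++ "I"), ih (n - 1) (by omega) ("" ++ "I")]
      simp [String.append_assoc]
    · simp

-- String.join peels its head
theorem foldl_str_append_init : ∀ (l : List String) (a : String),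
    l.foldl (· ++ ·) a = a ++ String.join l := by
  intro l
  induction l with
  | nil => intro a; simp [String.join]
  | cons x t ih =>
    intro a
    simp only [String.join, List.foldl_cons]
    rw [ih (a ++ x), ih ("" ++ x)]
    simp [String.append_assoc]

theorem join_cons (x : String) (t : List String) :
    String.join (x :: t) = x ++ String.join t := by
  simp only [String.join, List.foldl_cons]
  rw [foldl_str_append_init t ("" ++ x), foldl_str_append_init t ""]
  simp

-- closed form of A's numeral loop on nonnegative counts
theorem romA_closed : ∀ (k : Nat) (n : Int), 0 ≤ n → n.toNat ≤ k →
    romA n "" = String.join (List.replicate (PySem.Int.floordiv n 10).toNat "X")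
      ++ PySem.List.pyGetD pvOnes (PySem.Int.mod n 10) "" := by
  intro k
  induction k with
  | zero =>
    intro n h0 hn
    have hz : n = 0 := by omega
    subst hz
    simp [romA, pvOnes, String.join, PySem.Int.floordiv, PySem.Int.mod, PySem.List.pyGetD]
  | succ k ih =>
    intro n h0 hn
    by_cases h10 : 10 ≤ n
    · have hdiv : PySem.Int.floordiv n 10 = PySem.Int.floordiv (n - 10) 10 + 1 := by
        simp [PySem.Int.floordiv, Int.fdiv_eq_ediv]; omega
      have hmod : PySem.Int.mod n 10 = PySem.Int.mod (n - 10) 10 := by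
        simp [PySem.Int.mod, Int.fmod_eq_emod]
        try omega
      have hstep : romA n "" = "X" ++ romA (n - 10) "" := by
        rw [romA, if_neg (by omega), if_pos h10,
            romA_acc_out (n - 10).toNat (n - 10) le_rfl ("" ++ "X")]
        simp
      rw [hstep, ih (n - 10) (by omega) (by omega), hdiv, hmod]
      have hge : 0 ≤ PySem.Int.floordiv (n - 10) 10 := by
        simp [PySem.Int.floordiv, Int.fdiv_eq_ediv]; omega
      rw [show (PySem.Int.floordiv (n - 10) 10 + 1).toNat
            = (PySem.Int.floordiv (n - 10) 10).toNat + 1 by omega,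
          List.replicate_succ, join_cons, String.append_assoc]
    · -- 0 ≤ n < 10: finitely many literal cases
      interval_cases n <;>
        simp [romA, pvOnes, String.join, PySem.Int.floordiv, PySem.Int.mod, PySem.List.pyGetD]

-- folding string appends equals one join
theorem foldl_join_aux {α : Type} (l : List α) (g : α → String) (init : String) :
    l.foldl (fun s j => s ++ g j) init = init ++ String.join (l.map g) := by
  induction l generalizing init with
  | nil => simp [String.join]
  | cons x t ih =>
    simp only [List.foldl_cons, List.map_cons]
    rw [ih (init ++ g x), join_cons, String.append_assoc]

-- ===== VERDICT (by name: the statement is the Claim_ definition above) =====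
theorem GetNewString_spec : Claim_equal_GetNewString := by
  intro cs ns _hdom hpre
  obtain ⟨hlen, hnn⟩ := hpre
  unfold Spec_GetNewString GetNewString GetNewString_alt
  have hbody : (PySem.List.pyRange 0 cs.length 1).foldl
      (fun s i => romA (PySem.List.pyGetD ns i 0) s ++ PySem.List.pyGetD cs i "") ""
      = (PySem.List.pyRange 0 cs.length 1).foldl
      (fun s i => s ++ (romA (PySem.List.pyGetD ns i 0) "" ++ PySem.List.pyGetD cs i "")) "" := by
    apply PySem.List.foldl_congr_mem
    intro acc i _hi
    rw [romA_acc_out (PySem.List.pyGetD ns i 0).toNat _ le_rfl, String.append_assoc]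
  rw [hbody, foldl_join_aux, String.empty_append]
  congr 1
  apply List.ext_getElem
  · simp [PySem.List.length_pyRange_one, List.length_zip]
    omega
  · intro k hk1 hk2
    have hklt : k < cs.length := by
      simpa [PySem.List.length_pyRange_one] using hk1
    have hkns : k < ns.length := by omega
    rw [List.getElem_map, List.getElem_map, PySem.List.getElem_pyRange_one, zero_add]
    have hc : PySem.List.pyGetD cs (k : Int) "" = cs[k] := by
      rw [PySem.List.pyGetD_natCast]; exact List.getD_eq_getElem cs "" hklt
    have hn : PySem.List.pyGetD ns (k : Int) 0 = ns[k] := by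
      rw [PySem.List.pyGetD_natCast]; exact List.getD_eq_getElem ns 0 hkns
    rw [hc, hn]
    have hnn' : 0 ≤ ns[k] := by
      apply hnn
      have h1 : (ns.take cs.length)[k]'(by simp [List.length_take]; omega) = ns[k] :=
        List.getElem_take
      rw [← h1]
      exact List.getElem_mem _
    rw [romA_closed ns[k].toNat ns[k] hnn' le_rfl]
    simp [pieceB, List.getElem_zip, String.append_assoc]
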